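-- pv_equiv track=rewrite | github.com/kavya-kp/spheruler_chatbot | backend_final-4/logic/preprocess.py | correct_common_spelling
-- ===== SOURCE A (Python) =====
-- def correct_common_spelling(text):
--     """
--     Correct common spelling mistakes in domain-specific terms.
--     """
--     spelling_corrections = {
--         'spheruler': ['speruler', 'spherular', 'spheruller', 'sperular', 'spheruler'],
--         'accupan': ['acupan', 'accupann', 'acupann', 'akupan'],
--         'fcf': ['fccf', 'fcff', 'fc'],
--         'patent': ['pattent', 'patant', 'patnt'],
--         'panoramic': ['panoramc', 'panaromic', 'panoramac'],
--         'technology': ['tecnology', 'technolgy', 'techology'],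
--         'imaging': ['imagng', 'imging', 'imageing'],
--         'visualization': ['visualisation', 'visualizaton', 'vizualization'],
--         'product': ['prodcut', 'produkt', 'porduct'],
--         'products': ['prodcuts', 'produkts', 'porducts'],
--         'location': ['locaton', 'loction', 'lokation'],
--         'mission': ['mision', 'misssion', 'missoin'],
--         'vision': ['vison', 'visoin', 'vizion'],
--         'contact': ['contct', 'kontact', 'cantact'],
--         'founder': ['foonder', 'foundor', 'foundr'],
--         'founders': ['foonders', 'foundors', 'foundrs'],
--         'karthik': ['kartik', 'karthick', 'kartick'],
--         'guru': ['gru', 'guroo'],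
--     }
--
--     words = text.lower().split()
--     corrected_words = []
--
--     for word in words:
--         corrected = word
--         # Check if this word is a misspelling
--         for correct_word, misspellings in spelling_corrections.items():
--             if word in misspellings or word == correct_word:
--                 corrected = correct_word
--                 break
--         corrected_words.append(corrected)
--
--     return ' '.join(corrected_words)
-- ===== SOURCE B (Python) =====
-- # Flat precomputed reverse index (variant -> canonical), one dict lookup per word.
-- _CANONICAL = {
--     'spheruler': 'spheruler',
--     'speruler': 'spheruler',
--     'spherular': 'spheruler',
--     'spheruller': 'spheruler',
--     'sperular': 'spheruler',
--     'accupan': 'accupan',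
--     'acupan': 'accupan',
--     'accupann': 'accupan',
--     'acupann': 'accupan',
--     'akupan': 'accupan',
--     'fcf': 'fcf',
--     'fccf': 'fcf',
--     'fcff': 'fcf',
--     'fc': 'fcf',
--     'patent': 'patent',
--     'pattent': 'patent',
--     'patant': 'patent',
--     'patnt': 'patent',
--     'panoramic': 'panoramic',
--     'panoramc': 'panoramic',
--     'panaromic': 'panoramic',
--     'panoramac': 'panoramic',
--     'technology': 'technology',
--     'tecnology': 'technology',
--     'technolgy': 'technology',
--     'techology': 'technology',
--     'imaging': 'imaging',
--     'imagng': 'imaging',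
--     'imging': 'imaging',
--     'imageing': 'imaging',
--     'visualization': 'visualization',
--     'visualisation': 'visualization',
--     'visualizaton': 'visualization',
--     'vizualization': 'visualization',
--     'product': 'product',
--     'prodcut': 'product',
--     'produkt': 'product',
--     'porduct': 'product',
--     'products': 'products',
--     'prodcuts': 'products',
--     'produkts': 'products',
--     'porducts': 'products',
--     'location': 'location',
--     'locaton': 'location',
--     'loction': 'location',
--     'lokation': 'location',
--     'mission': 'mission',
--     'mision': 'mission',
--     'misssion': 'mission',
--     'missoin': 'mission',
--     'vision': 'vision',
--     'vison': 'vision',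
--     'visoin': 'vision',
--     'vizion': 'vision',
--     'contact': 'contact',
--     'contct': 'contact',
--     'kontact': 'contact',
--     'cantact': 'contact',
--     'founder': 'founder',
--     'foonder': 'founder',
--     'foundor': 'founder',
--     'foundr': 'founder',
--     'founders': 'founders',
--     'foonders': 'founders',
--     'foundors': 'founders',
--     'foundrs': 'founders',
--     'karthik': 'karthik',
--     'kartik': 'karthik',
--     'karthick': 'karthik',
--     'kartick': 'karthik',
--     'guru': 'guru',
--     'gru': 'guru',
--     'guroo': 'guru'
-- }
--
--
-- def correct_common_spelling(text):
--     """
--     Correct common spelling mistakes in domain-specific terms.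
--     """
--     return ' '.join(_CANONICAL.get(word, word) for word in text.lower().split())
-- ===== Notes on version B (the rewrite author's own statement) =====
-- stated objective: simpler
-- what changed: B replaces A's nested per-word scan over the corrections dict with a flat precomputed module-level reverse index (variant -> canonical word) and a single dict lookup per word in one pass over the split text.
import Mathlib
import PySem

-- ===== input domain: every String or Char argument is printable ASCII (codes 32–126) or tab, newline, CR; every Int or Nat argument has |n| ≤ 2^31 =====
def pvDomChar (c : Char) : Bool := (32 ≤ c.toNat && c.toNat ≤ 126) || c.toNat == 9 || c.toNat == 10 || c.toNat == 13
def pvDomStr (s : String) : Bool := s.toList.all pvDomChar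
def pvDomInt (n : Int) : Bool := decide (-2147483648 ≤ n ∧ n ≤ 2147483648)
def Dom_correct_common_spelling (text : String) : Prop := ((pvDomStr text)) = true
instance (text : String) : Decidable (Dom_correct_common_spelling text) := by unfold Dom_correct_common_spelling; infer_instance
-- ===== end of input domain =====

-- B replaces A's nested per-word scan with a flat precomputed reverse index and one lookup per word (objective: simpler).

-- ===== PORT A =====
def pvCorrections : List (String × List String) := [
  ("spheruler", ["speruler", "spherular", "spheruller", "sperular", "spheruler"]),
  ("accupan", ["acupan", "accupann", "acupann", "akupan"]),
  ("fcf", ["fccf", "fcff", "fc"]),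
  ("patent", ["pattent", "patant", "patnt"]),
  ("panoramic", ["panoramc", "panaromic", "panoramac"]),
  ("technology", ["tecnology", "technolgy", "techology"]),
  ("imaging", ["imagng", "imging", "imageing"]),
  ("visualization", ["visualisation", "visualizaton", "vizualization"]),
  ("product", ["prodcut", "produkt", "porduct"]),
  ("products", ["prodcuts", "produkts", "porducts"]),
  ("location", ["locaton", "loction", "lokation"]),
  ("mission", ["mision", "misssion", "missoin"]),
  ("vision", ["vison", "visoin", "vizion"]),
  ("contact", ["contct", "kontact", "cantact"]),
  ("founder", ["foonder", "foundor", "foundr"]),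
  ("founders", ["foonders", "foundors", "foundrs"]),
  ("karthik", ["kartik", "karthick", "kartick"]),
  ("guru", ["gru", "guroo"])]

-- inner 'for correct_word, misspellings in spelling_corrections.items(): if … : corrected = correct_word; break'
def pvScan (word : String) : List (String × List String) → String
  | [] => word
  | (c, ms) :: rest => if ms.contains word || word == c then c else pvScan word rest

def correct_common_spelling (text : String) : String :=
  let words := PySem.Str.split₀ (PySem.Str.lower text)
  let corrected_words := words.foldl (fun acc word => acc ++ [pvScan word pvCorrections]) []
  PySem.Str.join " " corrected_words

-- ===== PORT B =====
-- Source B's module-level dict literal _CANONICAL (all keys distinct, so ofList is exact)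
def pvCanonical : PySem.Dict String String := PySem.Dict.ofList [
  ("spheruler", "spheruler"),
  ("speruler", "spheruler"),
  ("spherular", "spheruler"),
  ("spheruller", "spheruler"),
  ("sperular", "spheruler"),
  ("accupan", "accupan"),
  ("acupan", "accupan"),
  ("accupann", "accupan"),
  ("acupann", "accupan"),
  ("akupan", "accupan"),
  ("fcf", "fcf"),
  ("fccf", "fcf"),
  ("fcff", "fcf"),
  ("fc", "fcf"),
  ("patent", "patent"),
  ("pattent", "patent"),
  ("patant", "patent"),
  ("patnt", "patent"),
  ("panoramic", "panoramic"),
  ("panoramc", "panoramic"),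
  ("panaromic", "panoramic"),
  ("panoramac", "panoramic"),
  ("technology", "technology"),
  ("tecnology", "technology"),
  ("technolgy", "technology"),
  ("techology", "technology"),
  ("imaging", "imaging"),
  ("imagng", "imaging"),
  ("imging", "imaging"),
  ("imageing", "imaging"),
  ("visualization", "visualization"),
  ("visualisation", "visualization"),
  ("visualizaton", "visualization"),
  ("vizualization", "visualization"),
  ("product", "product"),
  ("prodcut", "product"),
  ("produkt", "product"),
  ("porduct", "product"),
  ("products", "products"),
  ("prodcuts", "products"),
  ("produkts", "products"),
  ("porducts", "products"),
  ("location", "location"),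
  ("locaton", "location"),
  ("loction", "location"),
  ("lokation", "location"),
  ("mission", "mission"),
  ("mision", "mission"),
  ("misssion", "mission"),
  ("missoin", "mission"),
  ("vision", "vision"),
  ("vison", "vision"),
  ("visoin", "vision"),
  ("vizion", "vision"),
  ("contact", "contact"),
  ("contct", "contact"),
  ("kontact", "contact"),
  ("cantact", "contact"),
  ("founder", "founder"),
  ("foonder", "founder"),
  ("foundor", "founder"),
  ("foundr", "founder"),
  ("founders", "founders"),
  ("foonders", "founders"),
  ("foundors", "founders"),
  ("foundrs", "founders"),
  ("karthik", "karthik"),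
  ("kartik", "karthik"),
  ("karthick", "karthik"),
  ("kartick", "karthik"),
  ("guru", "guru"),
  ("gru", "guru"),
  ("guroo", "guru")]

def correct_common_spelling_alt (text : String) : String :=
  PySem.Str.join " "
    ((PySem.Str.split₀ (PySem.Str.lower text)).map (fun word => pvCanonical.getD word word))


-- ===== PRECONDITION & SPEC =====
def Spec_correct_common_spelling (text : String) (out : String) : Prop := out = correct_common_spelling_alt text
instance (text : String) (out : String) : Decidable (Spec_correct_common_spelling text out) := by unfold Spec_correct_common_spelling; infer_instance

-- ===== CLAIM (what is proved, stated in full; the proofs are below) =====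
def Claim_equal_correct_common_spelling : Prop := ∀ (text : String), Dom_correct_common_spelling text → Spec_correct_common_spelling text (correct_common_spelling text)

-- ===== LEMMAS AND PROOFS =====
def pvAllWords : List String := ["spheruler", "speruler", "spherular", "spheruller", "sperular", "accupan", "acupan", "accupann", "acupann", "akupan", "fcf", "fccf", "fcff", "fc", "patent", "pattent", "patant", "patnt", "panoramic", "panoramc", "panaromic", "panoramac", "technology", "tecnology", "technolgy", "techology", "imaging", "imagng", "imging", "imageing", "visualization", "visualisation", "visualizaton", "vizualization", "product", "prodcut", "produkt", "porduct", "products", "prodcuts", "produkts", "porducts", "location", "locaton", "loction", "lokation", "mission", "mision", "misssion", "missoin", "vision", "vison", "visoin", "vizion", "contact", "contct", "kontact", "cantact", "founder", "foonder", "foundor", "foundr", "founders", "foonders", "foundors", "foundrs", "karthik", "kartik", "karthick", "kartick", "guru", "gru", "guroo"]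

theorem pvScan_notmem (w : String) (L : List (String × List String))
    (h : ∀ p ∈ L, w ≠ p.1 ∧ w ∉ p.2) : pvScan w L = w := by
  induction L with
  | nil => rfl
  | cons p rest ih =>
    obtain ⟨p1, p2⟩ := p
    obtain ⟨hne, hnm⟩ := h _ (List.mem_cons_self ..)
    have : (p2.contains w || w == p1) = false := by
      simp [List.contains_eq_mem, hnm, hne]
    simp only [pvScan, this, Bool.false_eq_true, if_false]
    exact ih fun q hq => h q (List.mem_cons_of_mem _ hq)

theorem getD_mk_notmem (w : String) (l : List (String × String))
    (h : ∀ p ∈ l, w ≠ p.1) : (PySem.Dict.mk l).getD w w = w := by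
  induction l with
  | nil => rfl
  | cons p rest ih =>
    obtain ⟨k, v⟩ := p
    have hne : w ≠ k := h _ (List.mem_cons_self ..)
    simp only [PySem.Dict.getD, PySem.Dict.get?_mk_cons]
    rw [show (k == w) = false by simp [Ne.symm hne]]
    have := ih fun q hq => h q (List.mem_cons_of_mem _ hq)
    simpa [PySem.Dict.getD] using this

theorem pvCorrections_sub : ∀ p ∈ pvCorrections, p.1 ∈ pvAllWords ∧ ∀ m ∈ p.2, m ∈ pvAllWords := by
  decide

-- the dict literal's keys are distinct, so ofList keeps the list as is
def pvItems : List (String × String) := [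
  ("spheruler", "spheruler"),
  ("speruler", "spheruler"),
  ("spherular", "spheruler"),
  ("spheruller", "spheruler"),
  ("sperular", "spheruler"),
  ("accupan", "accupan"),
  ("acupan", "accupan"),
  ("accupann", "accupan"),
  ("acupann", "accupan"),
  ("akupan", "accupan"),
  ("fcf", "fcf"),
  ("fccf", "fcf"),
  ("fcff", "fcf"),
  ("fc", "fcf"),
  ("patent", "patent"),
  ("pattent", "patent"),
  ("patant", "patent"),
  ("patnt", "patent"),
  ("panoramic", "panoramic"),
  ("panoramc", "panoramic"),
  ("panaromic", "panoramic"),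
  ("panoramac", "panoramic"),
  ("technology", "technology"),
  ("tecnology", "technology"),
  ("technolgy", "technology"),
  ("techology", "technology"),
  ("imaging", "imaging"),
  ("imagng", "imaging"),
  ("imging", "imaging"),
  ("imageing", "imaging"),
  ("visualization", "visualization"),
  ("visualisation", "visualization"),
  ("visualizaton", "visualization"),
  ("vizualization", "visualization"),
  ("product", "product"),
  ("prodcut", "product"),
  ("produkt", "product"),
  ("porduct", "product"),
  ("products", "products"),
  ("prodcuts", "products"),
  ("produkts", "products"),
  ("porducts", "products"),
  ("location", "location"),
  ("locaton", "location"),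
  ("loction", "location"),
  ("lokation", "location"),
  ("mission", "mission"),
  ("mision", "mission"),
  ("misssion", "mission"),
  ("missoin", "mission"),
  ("vision", "vision"),
  ("vison", "vision"),
  ("visoin", "vision"),
  ("vizion", "vision"),
  ("contact", "contact"),
  ("contct", "contact"),
  ("kontact", "contact"),
  ("cantact", "contact"),
  ("founder", "founder"),
  ("foonder", "founder"),
  ("foundor", "founder"),
  ("foundr", "founder"),
  ("founders", "founders"),
  ("foonders", "founders"),
  ("foundors", "founders"),
  ("foundrs", "founders"),
  ("karthik", "karthik"),
  ("kartik", "karthik"),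
  ("karthick", "karthik"),
  ("kartick", "karthik"),
  ("guru", "guru"),
  ("gru", "guru"),
  ("guroo", "guru")]

set_option maxRecDepth 40000 in
theorem pvCanonical_eq : pvCanonical = PySem.Dict.mk pvItems := by
  apply PySem.Dict.ext; decide

theorem pvItems_sub : ∀ p ∈ pvItems, p.1 ∈ pvAllWords := by decide

set_option maxRecDepth 40000 in
theorem pvKey (w : String) : pvScan w pvCorrections = pvCanonical.getD w w := by
  rw [pvCanonical_eq]
  by_cases hw : w ∈ pvAllWords
  · fin_cases hw <;> decide
  · rw [pvScan_notmem w pvCorrections (fun p hp => by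
      obtain ⟨h1, h2⟩ := pvCorrections_sub p hp
      exact ⟨fun e => hw (e ▸ h1), fun m => hw (h2 w m)⟩)]
    rw [getD_mk_notmem w pvItems (fun p hp e => hw (e ▸ pvItems_sub p hp))]

theorem pvFoldl_append (f : String → String) (ws : List String) (acc : List String) :
    ws.foldl (fun a w => a ++ [f w]) acc = acc ++ ws.map f := by
  induction ws generalizing acc with
  | nil => simp
  | cons x xs ih => simp [ih]

-- ===== VERDICT (by name: the statement is the Claim_ definition above) =====
theorem correct_common_spelling_spec : Claim_equal_correct_common_spelling := by
  intro text _
  unfold Spec_correct_common_spelling correct_common_spelling correct_common_spelling_alt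
  show PySem.Str.join " "
      ((PySem.Str.split₀ (PySem.Str.lower text)).foldl
        (fun acc word => acc ++ [pvScan word pvCorrections]) []) = _
  rw [pvFoldl_append (fun w => pvScan w pvCorrections)]
  simp only [pvKey, List.nil_append]
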